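-- pv_equiv track=rewrite | github.com/EpigramxD/GenDeblur | gen/size_utils.py | get_kernel_sizes
-- ===== SOURCE A (Python) =====
-- def get_kernel_sizes(kernel_size):
--     """
--     Получить размеры ядер для пирамиды в зависимости от максимального размера psf
--     :param kernel_size: максимальный размер ядра
--     :return: список размеров ядра
--     """
--     kernel_sizes = []
--
--     step = 2
--     current_kernel_size = 3
--     while current_kernel_size <= kernel_size:
--         kernel_sizes.append(current_kernel_size)
--         current_kernel_size += step
--         step *= 2
--
--     if kernel_sizes[len(kernel_sizes) - 1] < kernel_size:
--         kernel_sizes.append(kernel_size)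
--
--     return kernel_sizes
-- ===== SOURCE B (Python) =====
-- def get_kernel_sizes(kernel_size):
--     """
--     Получить размеры ядер для пирамиды в зависимости от максимального размера psf
--     :param kernel_size: максимальный размер ядра
--     :return: список размеров ядра
--     """
--     kernel_sizes = [2 ** i + 1
--                     for i in range(1, kernel_size.bit_length() + 1)
--                     if 2 ** i + 1 <= kernel_size]
--
--     if kernel_sizes[-1] < kernel_size:
--         kernel_sizes.append(kernel_size)
--
--     return kernel_sizes
-- ===== Notes on version B (the rewrite author's own statement) =====
-- stated objective: idiomatic
-- what changed: Replaces the while-loop that maintains a doubling step and running current_kernel_size with a closed-form list comprehension over the powers of two (2**i+1 for i up to kernel_size.bit_length()), the tail append unchanged.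
import Mathlib
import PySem

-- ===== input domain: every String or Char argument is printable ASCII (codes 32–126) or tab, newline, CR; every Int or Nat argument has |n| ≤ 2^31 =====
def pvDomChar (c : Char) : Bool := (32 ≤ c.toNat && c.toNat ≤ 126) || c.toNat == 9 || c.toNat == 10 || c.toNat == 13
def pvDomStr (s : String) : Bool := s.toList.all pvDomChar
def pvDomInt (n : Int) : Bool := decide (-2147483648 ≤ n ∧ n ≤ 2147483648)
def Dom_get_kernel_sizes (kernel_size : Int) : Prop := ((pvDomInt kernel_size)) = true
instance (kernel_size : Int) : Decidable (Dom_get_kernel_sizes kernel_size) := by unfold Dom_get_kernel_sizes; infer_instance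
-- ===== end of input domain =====

-- B replaces A's doubling-accumulator while-loop by the closed form 2^i+1 over a range (idiomatic); same return values, including the tail append.

-- ===== PORT A =====
-- while current_kernel_size <= kernel_size: append; current += step; step *= 2
-- (the 0 < step hypothesis is only a termination guard; A's loop always has step ≥ 2)
def pvALoop (kernel_size step cur : Int) (hs : 0 < step) (acc : List Int) : List Int :=
  if _h : cur ≤ kernel_size then
    pvALoop kernel_size (step * 2) (cur + step) (by omega) (acc ++ [cur])
  else acc
termination_by (kernel_size + 1 - cur).toNat
decreasing_by omega

def get_kernel_sizes (kernel_size : Int) : List Int :=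
  let kernel_sizes := pvALoop kernel_size 2 3 (by norm_num) []
  -- kernel_sizes[len(kernel_sizes) - 1]: none = IndexError (kernel_size < 3), excluded by Pre_
  match PySem.List.pyGet? kernel_sizes ((PySem.List.len kernel_sizes) - 1) with
  | none => []
  | some last => if last < kernel_size then kernel_sizes ++ [kernel_size] else kernel_sizes

-- ===== PORT B =====
-- int.bit_length(): bits of |n|; Nat.size is exactly that on naturals (hand port, exact for all Int)
def pvBitLength (n : Int) : Int := (Nat.size n.natAbs : Int)

def get_kernel_sizes_alt (kernel_size : Int) : List Int :=
  -- [2**i + 1 for i in range(1, bit_length+1) if 2**i + 1 <= kernel_size]; every i in the range is ≥ 1, so i.toNat is exact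
  let kernel_sizes :=
    ((PySem.List.pyRange 1 (pvBitLength kernel_size + 1) 1).filter
        (fun i => decide ((2:Int) ^ i.toNat + 1 ≤ kernel_size))).map
      (fun i => (2:Int) ^ i.toNat + 1)
  -- kernel_sizes[-1]: none = IndexError (kernel_size < 3), excluded by Pre_
  match PySem.List.pyGet? kernel_sizes (-1) with
  | none => []
  | some last => if last < kernel_size then kernel_sizes ++ [kernel_size] else kernel_sizes

-- ===== PRECONDITION & SPEC =====
-- For kernel_size < 3 the built list is empty and Python A raises IndexError on kernel_sizes[len-1]; exactly those inputs are excluded.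
def Pre_get_kernel_sizes (kernel_size : Int) : Prop := 3 ≤ kernel_size
instance (kernel_size : Int) : Decidable (Pre_get_kernel_sizes kernel_size) := by unfold Pre_get_kernel_sizes; infer_instance
def pvWitness_get_kernel_sizes : Int := 17

def Spec_get_kernel_sizes (kernel_size : Int) (out : List Int) : Prop := out = get_kernel_sizes_alt kernel_size
instance (kernel_size : Int) (out : List Int) : Decidable (Spec_get_kernel_sizes kernel_size out) := by unfold Spec_get_kernel_sizes; infer_instance

-- ===== CLAIM (what is proved, stated in full; the proofs are below) =====
def Claim_equal_get_kernel_sizes : Prop := ∀ (kernel_size : Int), Dom_get_kernel_sizes kernel_size → Pre_get_kernel_sizes kernel_size → Spec_get_kernel_sizes kernel_size (get_kernel_sizes kernel_size)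

-- ===== LEMMAS AND PROOFS =====

-- the common shape: indices i ≥ m with 2^i + 1 ≤ k, in increasing order
def pvL (k : Int) (m : Nat) : List Nat :=
  if _h : (2:Int) ^ m + 1 ≤ k then m :: pvL k (m + 1) else []
termination_by (k + 1 - 2 ^ m).toNat
decreasing_by
  have h1 : (2:Int) ^ m < 2 ^ (m + 1) := by
    have := pow_lt_pow_right₀ (a := (2:Int)) (by norm_num) (Nat.lt_succ_self m)
    exact this
  omega

theorem pvALoop_eq (k : Int) (j : Nat) : ∀ (step cur : Int) (hs : 0 < step) (acc : List Int),
    step = (2:Int) ^ (j + 1) → cur = (2:Int) ^ (j + 1) + 1 →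
    pvALoop k step cur hs acc = acc ++ (pvL k (j + 1)).map (fun i => (2:Int) ^ i + 1) := by
  intro step cur hs acc hstep hcur
  unfold pvALoop pvL
  by_cases hle : cur ≤ k
  · rw [dif_pos hle, dif_pos (by omega : (2:Int) ^ (j + 1) + 1 ≤ k)]
    rw [pvALoop_eq k (j + 1) (step * 2) (cur + step) (by omega) (acc ++ [cur])
        (by rw [hstep]; ring) (by rw [hstep, hcur]; ring)]
    simp [hcur]
  · rw [dif_neg hle, dif_neg (by omega : ¬ ((2:Int) ^ (j + 1) + 1 ≤ k))]
    simp
termination_by (k + 1 - 2 ^ (j + 1)).toNat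
decreasing_by omega

-- monotone vanishing of pvL past the bit length
theorem pvL_eq_nil (k : Int) (m : Nat) (h : ¬ (2:Int) ^ m + 1 ≤ k) : pvL k m = [] := by
  unfold pvL; simp [h]

theorem pvFilter_eq (k : Int) (hk : 3 ≤ k) (m : Nat) (hm : 1 ≤ m)
    (hub : (m : Int) ≤ pvBitLength k + 1) :
    ((PySem.List.pyRange (m : Int) (pvBitLength k + 1) 1).filter
        (fun i => decide ((2:Int) ^ i.toNat + 1 ≤ k))).map (fun i => (2:Int) ^ i.toNat + 1)
      = (pvL k m).map (fun i => (2:Int) ^ i + 1) := by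
  by_cases hend : (m : Int) = pvBitLength k + 1
  · -- empty range; and pvL k m = [] because k < 2^bl ≤ 2^m
    rw [PySem.List.pyRange_one_eq_nil (by omega)]
    have hbl : k.natAbs < 2 ^ (Nat.size k.natAbs) := Nat.lt_size_self _
    have hk' : k = (k.natAbs : Int) := by omega
    have hmb : Nat.size k.natAbs < m := by
      have : ((Nat.size k.natAbs : Int)) < (m : Int) := by unfold pvBitLength at hend; omega
      exact_mod_cast this
    have hlt : k < (2:Int) ^ m := by
      calc k = (k.natAbs : Int) := hk'
        _ < ((2 ^ (Nat.size k.natAbs) : Nat) : Int) := by exact_mod_cast hbl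
        _ ≤ (2:Int) ^ m := by
            push_cast
            exact pow_le_pow_right₀ (by norm_num) (le_of_lt hmb)
    rw [pvL_eq_nil k m (by omega)]
    simp
  · have hmlt : (m : Int) < pvBitLength k + 1 := lt_of_le_of_ne hub hend
    rw [PySem.List.pyRange_one_cons hmlt]
    unfold pvL
    by_cases hc : (2:Int) ^ m + 1 ≤ k
    · have htn : ((m : Int)).toNat = m := by omega
      rw [dif_pos hc]
      simp only [List.filter_cons, htn, hc, decide_true, if_true, List.map_cons]
      rw [show ((m : Int) + 1) = ((m + 1 : Nat) : Int) from by push_cast; ring]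
      rw [pvFilter_eq k hk (m + 1) (by omega) (by push_cast; omega)]
    · -- head fails, and every later index fails too (2^i monotone): both sides are []
      have hall : ∀ i ∈ PySem.List.pyRange ((m : Int) + 1) (pvBitLength k + 1) 1,
          ¬ ((2:Int) ^ i.toNat + 1 ≤ k) := by
        intro i hi
        rw [PySem.List.mem_pyRange_one] at hi
        have him : m ≤ i.toNat := by omega
        have : (2:Int) ^ m ≤ 2 ^ i.toNat := pow_le_pow_right₀ (by norm_num) him
        omega
      have htn : ((m : Int)).toNat = m := by omega
      rw [dif_neg hc]
      simp only [List.filter_cons, htn, hc, decide_false, if_false, Bool.false_eq_true]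
      rw [List.filter_eq_nil_iff.mpr (by intro a ha; simpa using hall a ha)]
      simp
termination_by (pvBitLength k + 1 - m).toNat
decreasing_by omega

theorem pvL_one_cons (k : Int) (hk : 3 ≤ k) : pvL k 1 = 1 :: pvL k 2 := by
  have h3 : (2:Int) ^ 1 + 1 ≤ k := by norm_num; omega
  conv_lhs => rw [pvL]
  rw [dif_pos h3]

-- ===== VERDICT (by name: the statement is the Claim_ definition above) =====
theorem get_kernel_sizes_spec : Claim_equal_get_kernel_sizes := by
  intro k _hdom hpre
  unfold Spec_get_kernel_sizes get_kernel_sizes get_kernel_sizes_alt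
  have hk : 3 ≤ k := hpre
  have hA : pvALoop k 2 3 (by norm_num) [] = (pvL k 1).map (fun i => (2:Int) ^ i + 1) := by
    simpa using pvALoop_eq k 0 2 3 (by norm_num) [] (by norm_num) (by norm_num)
  have hB : ((PySem.List.pyRange (1 : Int) (pvBitLength k + 1) 1).filter
        (fun i => decide ((2:Int) ^ i.toNat + 1 ≤ k))).map (fun i => (2:Int) ^ i.toNat + 1)
      = (pvL k 1).map (fun i => (2:Int) ^ i + 1) := by
    have hbl : (1 : Int) ≤ pvBitLength k + 1 := by
      unfold pvBitLength
      have := Int.natCast_nonneg (Nat.size k.natAbs)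
      omega
    exact_mod_cast pvFilter_eq k hk 1 le_rfl hbl
  set L : List Int := (pvL k 1).map (fun i => (2:Int) ^ i + 1) with hL
  have hne : L ≠ [] := by rw [hL, pvL_one_cons k hk]; simp
  simp only [hA, hB]
  -- both index the same nonempty list: [len-1] and [-1] are both the last element
  have hlen : 0 < L.length := List.length_pos_iff.mpr hne
  have hlast : PySem.List.pyGet? L ((PySem.List.len L) - 1) = PySem.List.pyGet? L (-1) := by
    rw [PySem.List.pyGet?_neg_one, PySem.List.len_eq]
    rw [show ((L.length : Int) - 1) = ((L.length - 1 : Nat) : Int) from by omega]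
    rw [PySem.List.pyGet?_natCast]
    exact (List.getLast?_eq_getElem? (l := L)).symm
  rw [hlast]
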